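-- pv_equiv track=rewrite | github.com/iesl/paper-header | python/mung_citation.py | BILOU
-- ===== SOURCE A (Python) =====
-- def BILOU(stuff, tag):
-- 	thing = ""
-- 	if len(stuff) > 1:
-- 		thing = "B-%s\t%s\n" % (tag, stuff[0])
-- 		if len(thing) > 2:
-- 			for i in range(1, len(stuff)-1):
-- 				thing += "I-%s\t%s\n" % (tag, stuff[i])
-- 		thing += "L-%s\t%s\n" % (tag, stuff[-1])
-- 	else:
-- 		thing = "U-%s\t%s\n" % (tag, stuff[0])
-- 	return thing
-- ===== SOURCE B (Python) =====
-- def BILOU(stuff, tag):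
--     n = len(stuff)
--     if n <= 1:
--         return "U-%s\t%s\n" % (tag, stuff[0])
--     lines = []
--     for i, x in enumerate(stuff):
--         letter = 'B' if i == 0 else ('L' if i == n - 1 else 'I')
--         lines.append("%s-%s\t%s\n" % (letter, tag, x))
--     return ''.join(lines)
-- ===== Notes on version B (the rewrite author's own statement) =====
-- stated objective: idiomatic
-- what changed: A's three separate first/middle/last formatting statements and string += accumulation are replaced by one uniform enumerate pass that picks the label letter (B/L/I) by position and joins the lines at the end.
import Mathlib
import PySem

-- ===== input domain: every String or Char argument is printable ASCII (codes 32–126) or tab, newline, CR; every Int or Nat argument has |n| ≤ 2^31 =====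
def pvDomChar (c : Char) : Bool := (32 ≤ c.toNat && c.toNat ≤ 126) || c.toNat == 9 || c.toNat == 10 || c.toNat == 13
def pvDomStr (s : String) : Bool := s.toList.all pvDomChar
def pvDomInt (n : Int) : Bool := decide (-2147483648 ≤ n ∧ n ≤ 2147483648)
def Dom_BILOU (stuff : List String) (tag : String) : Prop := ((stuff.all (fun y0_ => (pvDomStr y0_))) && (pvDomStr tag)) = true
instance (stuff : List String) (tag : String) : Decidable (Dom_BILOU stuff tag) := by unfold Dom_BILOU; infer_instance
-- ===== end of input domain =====

-- B replaces A's three separate first/middle/last statements with one uniform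
-- enumerate pass choosing the label letter by position, joined at the end (objective: idiomatic).

-- ===== PORT A =====
-- "%c-%s\t%s\n" % (letter, tag, x), built on List Char (exact: %-formatting of strings is concatenation)
def fmtLine (letter : Char) (tag : String) (x : String) : List Char :=
  letter :: '-' :: tag.toList ++ '\t' :: x.toList ++ ['\n']

def BILOU (stuff : List String) (tag : String) : String :=
  if stuff.length > 1 then
    let thing := fmtLine 'B' tag (PySem.List.pyGetD stuff 0 "")
    let thing := if thing.length > 2 then
        (PySem.List.pyRange 1 ((stuff.length : Int) - 1) 1).foldl
          (fun acc i => acc ++ fmtLine 'I' tag (PySem.List.pyGetD stuff i "")) thing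
      else thing
    String.ofList (thing ++ fmtLine 'L' tag (PySem.List.pyGetD stuff (-1) ""))
  else String.ofList (fmtLine 'U' tag (PySem.List.pyGetD stuff 0 ""))

-- ===== PORT B =====
def BILOU_alt (stuff : List String) (tag : String) : String :=
  let n := stuff.length
  if n ≤ 1 then String.ofList (fmtLine 'U' tag (PySem.List.pyGetD stuff 0 ""))
  else
    let lines := (PySem.List.enumerate stuff 0).map (fun p =>
      let letter := if p.1 = 0 then 'B' else if p.1 = (n : Int) - 1 then 'L' else 'I'
      fmtLine letter tag p.2)
    String.ofList lines.flatten

-- ===== PRECONDITION & SPEC =====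
-- A (and B) raise IndexError on the empty list (stuff[0]); Pre_ excludes exactly that input.
def Pre_BILOU (stuff : List String) (tag : String) : Prop := stuff ≠ []
instance (stuff : List String) (tag : String) : Decidable (Pre_BILOU stuff tag) := by unfold Pre_BILOU; infer_instance
def pvWitness_BILOU : List String × String := (["alpha", "beta"], "name")

def Spec_BILOU (stuff : List String) (tag : String) (out : String) : Prop := out = BILOU_alt stuff tag
instance (stuff : List String) (tag : String) (out : String) : Decidable (Spec_BILOU stuff tag out) := by unfold Spec_BILOU; infer_instance

-- ===== CLAIM (what is proved, stated in full; the proofs are below) =====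
def Claim_equal_BILOU : Prop := ∀ (stuff : List String) (tag : String), Dom_BILOU stuff tag → Pre_BILOU stuff tag → Spec_BILOU stuff tag (BILOU stuff tag)

-- ===== LEMMAS AND PROOFS =====

-- ===== VERDICT (by name: the statement is the Claim_ definition above) =====
theorem flatMap_congr_mem {α β : Type} (l : List α) (f g : α → List β)
    (h : ∀ x ∈ l, f x = g x) : l.flatMap f = l.flatMap g := by
  simp only [List.flatMap_def]
  rw [List.map_congr_left h]

theorem BILOU_spec : Claim_equal_BILOU := by
  intro stuff tag _ hpre
  unfold Spec_BILOU BILOU BILOU_alt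
  by_cases hn : stuff.length > 1
  · simp only [hn, if_pos, Nat.not_le.mpr hn, if_false]
    have hlen : (fmtLine 'B' tag (PySem.List.pyGetD stuff 0 "")).length > 2 := by
      simp [fmtLine]
    rw [if_pos hlen]
    congr 1
    rw [PySem.List.foldl_append_eq_flatMap]
    rw [PySem.List.enumerate_eq_map_pyRange (d := "")]
    rw [List.flatten_eq_flatMap, List.flatMap_map]
    have h1 : (1 : Int) ≤ (stuff.length : Int) - 1 := by omega
    have hsplit2 : PySem.List.pyRange 0 (stuff.length : Int) 1 =
        PySem.List.pyRange 0 1 1 ++ PySem.List.pyRange 1 ((stuff.length : Int) - 1) 1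
          ++ PySem.List.pyRange ((stuff.length : Int) - 1) (stuff.length : Int) 1 := by
      rw [PySem.List.pyRange_one_append 0 1 (stuff.length : Int) (by omega) (by omega),
          PySem.List.pyRange_one_append 1 ((stuff.length : Int) - 1) (stuff.length : Int) h1 (by omega),
          List.append_assoc]
    simp only [PySem.List.len]
    rw [hsplit2, List.map_append, List.map_append, List.flatMap_append, List.flatMap_append]
    have hr1 : PySem.List.pyRange 0 1 1 = [0] := by decide
    have hr2 : PySem.List.pyRange ((stuff.length : Int) - 1) (stuff.length : Int) 1
        = [(stuff.length : Int) - 1] := by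
      rw [PySem.List.pyRange_one]
      simp
    rw [hr1, hr2]
    simp only [List.map_cons, List.map_nil, List.flatMap_cons, List.flatMap_nil, List.append_nil, id_eq]
    have hlast : PySem.List.pyGetD stuff ((stuff.length : Int) - 1) "" = PySem.List.pyGetD stuff (-1) "" := by
      have h2 : ((stuff.length : Int) - 1) = ((stuff.length - 1 : Nat) : Int) := by omega
      rw [PySem.List.pyGetD_neg_one stuff "" hpre, h2, PySem.List.pyGetD_natCast,
          List.getD_eq_getElem stuff "" (by omega), List.getLast_eq_getElem]
    rw [hlast]
    have hne : ((stuff.length : Int) - 1) ≠ 0 := by omega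
    simp only [List.flatMap_map, if_true, if_neg hne]
    have hmid : ∀ j ∈ PySem.List.pyRange 1 ((stuff.length : Int) - 1) 1,
        fmtLine (if j = 0 then 'B' else if j = (stuff.length : Int) - 1 then 'L' else 'I') tag
          (PySem.List.pyGetD stuff j "")
        = fmtLine 'I' tag (PySem.List.pyGetD stuff j "") := by
      intro j hj
      rw [PySem.List.mem_pyRange_one] at hj
      rw [if_neg (by omega), if_neg (by omega)]
    rw [flatMap_congr_mem _ _ _ hmid]
  · rw [if_neg hn, if_pos (by omega)]
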